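-- pv_equiv track=rewrite | github.com/wuliJerry/bringup-bench | utils.py | count_pattern_matches
-- ===== SOURCE A (Python) =====
-- def count_pattern_matches(a, b):
--     """
--     Calculates sums of partial products (a[i]*b[j]) for a 32x32 multiplication
--     and checks them against a predefined set of properties ("cases").
--     """
--     N = 32
--     a_bits = [(a >> i) & 1 for i in range(N)]
--     b_bits = [(b >> i) & 1 for i in range(N)]
--     comb = {}
--     for i in range(N):
--         for j in range(N):
--             comb[(i, j)] = a_bits[i] * b_bits[j]
--
--     results = {}
--     case_counter = 0
--     for k in range(1, 2 * N - 2): # k from 1 to 61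
--         current_Sk_sum = 0
--         i_start = max(0, k - (N - 1))
--         i_end = min(k, N - 1)
--         for i in range(i_start, i_end + 1):
--             j = k - i
--             if 0 <= j < N:
--                 current_Sk_sum += comb[(i, j)]
--
--         if k < N: M_k = k + 1
--         else: M_k = 2 * N - 1 - k
--         is_N_minus_1_sum = (k == N - 1)
--
--         evaluated_properties_for_Sk = []
--         if M_k == 2:
--             evaluated_properties_for_Sk.append(current_Sk_sum == 2)
--         elif M_k == 3:
--             evaluated_properties_for_Sk.append(current_Sk_sum >= 2)
--         else: # M_k >= 4
--             temp_specific_props = []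
--             L_bound = 2
--             while L_bound <= M_k:
--                 if is_N_minus_1_sum and L_bound == M_k: break
--                 if L_bound == M_k:
--                     temp_specific_props.append(current_Sk_sum == M_k)
--                     L_bound += 1
--                 elif L_bound + 1 == M_k:
--                     if is_N_minus_1_sum:
--                         temp_specific_props.append(current_Sk_sum >= L_bound and current_Sk_sum < M_k)
--                     else:
--                         temp_specific_props.append(current_Sk_sum >= L_bound)
--                     L_bound += 2
--                 else:
--                     temp_specific_props.append(current_Sk_sum >= L_bound and current_Sk_sum < (L_bound + 2))
--                     L_bound += 2
--             evaluated_properties_for_Sk.extend(temp_specific_props)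
--             evaluated_properties_for_Sk.append(current_Sk_sum >= 2)
--
--         for prop_result in evaluated_properties_for_Sk:
--             case_counter += 1
--             results[case_counter] = prop_result
--     return results
-- ===== SOURCE B (Python) =====
-- def count_pattern_matches(a, b):
--     """Same results dict via Kronecker substitution: spread each operand's 32 bits
--     into 7-bit slots, do ONE big-integer multiply (base-128 is carry-free since a
--     diagonal sum is at most 32), and read each anti-diagonal sum off the product
--     as a base-128 digit; properties come from closed-form step-2 threshold ranges."""
--     N = 32
--     A = sum(((a >> i) & 1) * 128 ** i for i in range(N))
--     B = sum(((b >> i) & 1) * 128 ** i for i in range(N))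
--     P = A * B
--     props = []
--     for k in range(1, 2 * N - 2):
--         s = (P // 128 ** k) % 128
--         M = k + 1 if k < N else 2 * N - 1 - k
--         if M == 2:
--             props.append(s == 2)
--         elif M == 3:
--             props.append(s >= 2)
--         else:
--             props.extend(L <= s < L + 2 for L in range(2, M - 1, 2))
--             if M % 2 == 1:
--                 props.append(s >= M - 1)
--             elif k != N - 1:
--                 props.append(s == M)
--             props.append(s >= 2)
--     return {idx: p for idx, p in enumerate(props, 1)}
-- ===== Notes on version B (the rewrite author's own statement) =====
-- stated objective: faster
-- what changed: B computes all 63 anti-diagonal partial-product sums at once by Kronecker substitution - spread each operand's 32 bits into 7-bit slots and perform ONE big-integer multiplication, carry-free because each diagonal sum is at most 32 < 128, then read S[k] off the product as a base-128 digit - replacing A's 1024-entry comb dict and per-diagonal gather loops; A's stateful threshold while-loop is replaced by closed-form step-2 ranges with a parity-determined tail.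
import Mathlib
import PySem

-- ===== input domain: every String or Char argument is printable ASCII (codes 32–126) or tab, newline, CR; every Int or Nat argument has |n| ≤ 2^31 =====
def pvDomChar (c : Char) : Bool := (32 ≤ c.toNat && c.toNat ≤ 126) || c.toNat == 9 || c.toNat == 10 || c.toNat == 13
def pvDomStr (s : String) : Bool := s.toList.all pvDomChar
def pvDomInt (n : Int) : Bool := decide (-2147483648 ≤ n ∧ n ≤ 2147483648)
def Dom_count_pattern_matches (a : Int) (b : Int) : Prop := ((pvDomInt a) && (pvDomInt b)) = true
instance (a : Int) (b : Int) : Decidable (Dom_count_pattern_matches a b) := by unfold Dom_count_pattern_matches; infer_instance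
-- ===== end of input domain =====

-- B replaces A's comb dict and per-diagonal gather loops by Kronecker substitution (spread the
-- bits into 7-bit slots, ONE big-integer multiply, read each diagonal sum as a base-128 digit)
-- and A's threshold while-loop by closed-form step-2 ranges; measured faster by a constant factor.

-- ===== PORT A =====
-- shared primitive: Python's `(x >> i) & 1` (both sources contain this exact expression; 0 <= i at every use, exact)
def pyBit (x i : Int) : Int := PySem.Int.band (x >>> i.toNat) 1

-- A's inner `while L_bound <= M_k` loop, accumulating temp_specific_props in acc.
def cpmWhile (s M : Int) (isN1 : Bool) (L : Int) (acc : List Bool) : List Bool :=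
  if _h : L ≤ M then
    if isN1 ∧ L = M then acc
    else if L = M then
      cpmWhile s M isN1 (L + 1) (acc ++ [decide (s = M)])
    else if L + 1 = M then
      if isN1 then cpmWhile s M isN1 (L + 2) (acc ++ [decide (s ≥ L) && decide (s < M)])
      else cpmWhile s M isN1 (L + 2) (acc ++ [decide (s ≥ L)])
    else cpmWhile s M isN1 (L + 2) (acc ++ [decide (s ≥ L) && decide (s < L + 2)])
  else acc
termination_by (M + 1 - L).toNat
decreasing_by all_goals omega

-- literal port of A; `(x >> i) & 1` is `Int.band (x >>> i.toNat) 1` (i ≥ 0 here, exact);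
-- `comb[(i,j)]` is `getD … 0`, exact because the key is always present at the use site.
def count_pattern_matches (a : Int) (b : Int) : List (Int × Bool) :=
  let N : Int := 32
  let a_bits : List Int := (PySem.List.pyRange 0 N 1).map (fun i => pyBit a i)
  let b_bits : List Int := (PySem.List.pyRange 0 N 1).map (fun i => pyBit b i)
  let comb : PySem.Dict (Int × Int) Int :=
    (PySem.List.pyRange 0 N 1).foldl (fun d i =>
      (PySem.List.pyRange 0 N 1).foldl (fun d j =>
        d.insert (i, j) (PySem.List.pyGetD a_bits i 0 * PySem.List.pyGetD b_bits j 0)) d)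
      PySem.Dict.empty
  let st :=
    (PySem.List.pyRange 1 (2 * N - 2) 1).foldl (fun (st : PySem.Dict Int Bool × Int) k =>
      let current_Sk_sum : Int :=
        (PySem.List.pyRange (max 0 (k - (N - 1))) (min k (N - 1) + 1) 1).foldl (fun s i =>
          if 0 ≤ k - i ∧ k - i < N then s + PySem.Dict.getD comb (i, k - i) 0 else s) 0
      let M_k : Int := if k < N then k + 1 else 2 * N - 1 - k
      let is_N_minus_1_sum : Bool := decide (k = N - 1)
      let evaluated : List Bool :=
        if M_k = 2 then [decide (current_Sk_sum = 2)]
        else if M_k = 3 then [decide (current_Sk_sum ≥ 2)]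
        else cpmWhile current_Sk_sum M_k is_N_minus_1_sum 2 [] ++ [decide (current_Sk_sum ≥ 2)]
      evaluated.foldl (fun (st : PySem.Dict Int Bool × Int) p =>
        (st.1.insert (st.2 + 1) p, st.2 + 1)) st)
      (PySem.Dict.empty, 0)
  st.1.items

-- ===== PORT B =====
-- literal port of Source B: spread the bits into 7-bit slots (`128 ** i` is `(128:Int) ^ i.toNat`,
-- exact since i ≥ 0 at every use), one product, digits by `// 128**k` and `% 128`.
def count_pattern_matches_alt (a : Int) (b : Int) : List (Int × Bool) :=
  let N : Int := 32
  let A : Int := (PySem.List.pyRange 0 N 1).foldl (fun acc i => acc + pyBit a i * 128 ^ i.toNat) 0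
  let B : Int := (PySem.List.pyRange 0 N 1).foldl (fun acc i => acc + pyBit b i * 128 ^ i.toNat) 0
  let P : Int := A * B
  let props : List Bool :=
    (PySem.List.pyRange 1 (2 * N - 2) 1).foldl (fun acc k =>
      let s : Int := PySem.Int.mod (PySem.Int.floordiv P (128 ^ k.toNat)) 128
      let M : Int := if k < N then k + 1 else 2 * N - 1 - k
      if M = 2 then acc ++ [decide (s = 2)]
      else if M = 3 then acc ++ [decide (s ≥ 2)]
      else
        acc ++ ((PySem.List.pyRange 2 (M - 1) 2).map (fun L => decide (L ≤ s ∧ s < L + 2))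
            ++ (if PySem.Int.mod M 2 = 1 then [decide (s ≥ M - 1)]
                else if k ≠ N - 1 then [decide (s = M)] else [])
            ++ [decide (s ≥ 2)])) []
  (PySem.Dict.ofList (PySem.List.enumerate props 1)).items

-- ===== PRECONDITION & SPEC =====
def Spec_count_pattern_matches (a : Int) (b : Int) (out : List (Int × Bool)) : Prop := out = count_pattern_matches_alt a b
instance (a : Int) (b : Int) (out : List (Int × Bool)) : Decidable (Spec_count_pattern_matches a b out) := by unfold Spec_count_pattern_matches; infer_instance

-- ===== CLAIM (what is proved, stated in full; the proofs are below) =====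
def Claim_equal_count_pattern_matches : Prop := ∀ (a : Int) (b : Int), Dom_count_pattern_matches a b → Spec_count_pattern_matches a b (count_pattern_matches a b)

-- ===== LEMMAS AND PROOFS =====

lemma bit01 (x i : Int) : pyBit x i = 0 ∨ pyBit x i = 1 := by
  unfold pyBit
  rw [PySem.Int.band_one]
  have h1 := PySem.Int.mod_nonneg (x >>> i.toNat) (b := 2) (by norm_num)
  have h2 := PySem.Int.mod_lt (x >>> i.toNat) (b := 2) (by norm_num)
  omega

lemma get?_foldl_insert_of_not_mem {κ α : Type} [BEq κ] [LawfulBEq κ] (l : List Int)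
    (key : Int → κ) (g : Int → α) (x : κ) :
    ∀ d : PySem.Dict κ α, (∀ j ∈ l, key j ≠ x) →
      (l.foldl (fun d j => d.insert (key j) (g j)) d).get? x = d.get? x := by
  induction l with
  | nil => intro d _; rfl
  | cons j t ih =>
      intro d h
      simp only [List.foldl_cons]
      rw [ih _ (fun j' hj' => h j' (List.mem_cons_of_mem _ hj'))]
      exact PySem.Dict.get?_insert_of_ne d (g j) (Ne.symm (h j (List.mem_cons_self ..)))

lemma get?_foldl_insert_mem {κ α : Type} [BEq κ] [LawfulBEq κ] (l : List Int)
    (key : Int → κ) (g : Int → α) (hinj : Function.Injective key) :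
    ∀ (d : PySem.Dict κ α) (j₀ : Int), j₀ ∈ l →
      (l.foldl (fun d j => d.insert (key j) (g j)) d).get? (key j₀) = some (g j₀) := by
  induction l with
  | nil => intro d j₀ h; cases h
  | cons j t ih =>
      intro d j₀ hmem
      simp only [List.foldl_cons]
      by_cases hj : j₀ ∈ t
      · exact ih _ _ hj
      · have hje : j₀ = j := by
          rcases List.mem_cons.mp hmem with h | h
          · exact h
          · exact absurd h hj
        subst hje
        rw [get?_foldl_insert_of_not_mem t key g _ _
          (fun j' hj' he => hj (by rwa [hinj he] at hj'))]
        exact PySem.Dict.get?_insert_self d _ _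

lemma comb_outer_preserve (f : Int → Int → Int) (lj : List Int) (x y : Int) :
    ∀ (t : List Int), x ∉ t → ∀ d : PySem.Dict (Int × Int) Int,
      (t.foldl (fun d i => lj.foldl (fun d j => d.insert (i, j) (f i j)) d) d).get? (x, y) = d.get? (x, y) := by
  intro t
  induction t with
  | nil => intro _ d; rfl
  | cons i t ih =>
      intro hx d
      simp only [List.foldl_cons]
      rw [ih (fun h => hx (List.mem_cons_of_mem _ h))]
      exact get?_foldl_insert_of_not_mem lj (fun j => (i, j)) (f i) _ _
        (fun j _ he => hx (by
          have : i = x := (Prod.mk.injEq ..).mp he |>.1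
          simp [this]))

lemma comb_get (f : Int → Int → Int) (li lj : List Int) (x y : Int)
    (hx : x ∈ li) (hy : y ∈ lj) (d : PySem.Dict (Int × Int) Int) :
    (li.foldl (fun d i => lj.foldl (fun d j => d.insert (i, j) (f i j)) d) d).get? (x, y) = some (f x y) := by
  induction li generalizing d with
  | nil => cases hx
  | cons i t ih =>
      simp only [List.foldl_cons]
      by_cases hxt : x ∈ t
      · exact ih hxt _
      · have hxe : x = i := by
          rcases List.mem_cons.mp hx with h | h
          · exact h
          · exact absurd h hxt
        subst hxe
        rw [comb_outer_preserve f lj x y t hxt]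
        exact get?_foldl_insert_mem lj (fun j => (x, j)) (f x)
          (fun a b h => by simpa using h) _ _ hy

lemma pyRange_two_eq_nil {a b : Int} (h : b ≤ a) : PySem.List.pyRange a b 2 = [] := by
  rw [PySem.List.pyRange_of_pos a b (by norm_num)]
  have : ¬ a < b := by omega
  simp [this]

lemma pyRange_two_cons {a b : Int} (h : a < b) :
    PySem.List.pyRange a b 2 = a :: PySem.List.pyRange (a + 2) b 2 := by
  rw [PySem.List.pyRange_of_pos a b (by norm_num), PySem.List.pyRange_of_pos (a + 2) b (by norm_num)]
  by_cases h2 : a + 2 < b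
  · have hn : ((b - a + 2 - 1) / 2).toNat = ((b - (a + 2) + 2 - 1) / 2).toNat + 1 := by omega
    rw [if_pos h, if_pos h2, hn, List.range_succ_eq_map]
    simp only [List.map_cons, List.map_map]
    refine List.cons_eq_cons.mpr ⟨by norm_num, ?_⟩
    apply List.map_congr_left
    intro x _
    simp only [Function.comp_apply, Nat.succ_eq_add_one]
    push_cast
    ring
  · have hn : ((b - a + 2 - 1) / 2).toNat = 1 := by omega
    rw [if_pos h, if_neg h2, hn]
    simp

lemma cpmWhile_eq (s M : Int) (flag : Bool) (hflag : flag = true → M = 32) :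
    ∀ (n : Nat) (L : Int) (acc : List Bool), (M + 1 - L).toNat ≤ n → 2 ≤ L → L % 2 = 0 →
      cpmWhile s M flag L acc
        = acc ++ (PySem.List.pyRange L (M - 1) 2).map (fun L' => decide (L' ≤ s ∧ s < L' + 2))
          ++ (if PySem.Int.mod M 2 = 1 then (if L ≤ M - 1 then [decide (s ≥ M - 1)] else [])
              else if flag = true then [] else if L ≤ M then [decide (s = M)] else []) := by
  have hm2 : PySem.Int.mod M 2 = M % 2 := PySem.Int.mod_eq_emod_of_pos (by norm_num)
  intro n
  induction n with
  | zero =>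
      intro L acc hn h2 hpar
      have hLM : ¬ L ≤ M := by omega
      rw [cpmWhile, dif_neg hLM]
      rw [pyRange_two_eq_nil (by omega)]
      have t1 : ¬ L ≤ M - 1 := by omega
      have t2 : ¬ L ≤ M := hLM
      rcases Int.emod_two_eq_zero_or_one M with hp | hp <;>
        simp [hm2, hp, t1, t2]
  | succ n ih =>
      intro L acc hn h2 hpar
      rw [cpmWhile]
      by_cases hLM : L ≤ M
      · rw [dif_pos hLM]
        by_cases hfm : (flag : Prop) ∧ L = M
        · rw [if_pos hfm]
          obtain ⟨hf, hLeq⟩ := hfm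
          have hM32 : M = 32 := hflag hf
          rw [pyRange_two_eq_nil (by omega)]
          simp [hm2, hM32, hLeq, hf]
        · rw [if_neg hfm]
          by_cases hLeq : L = M
          · rw [if_pos hLeq]
            have hf : flag = false := by
              cases flag
              · rfl
              · exact absurd ⟨rfl, hLeq⟩ hfm
            -- the recursive call at M+1 exits immediately
            rw [cpmWhile, dif_neg (by omega : ¬ L + 1 ≤ M)]
            rw [pyRange_two_eq_nil (by omega)]
            have hMe : M % 2 = 0 := by omega
            simp [hm2, hMe, hf, hLeq, hLM]
          · rw [if_neg hLeq]
            by_cases hL1 : L + 1 = M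
            · rw [if_pos hL1]
              have hMo : M % 2 = 1 := by omega
              have hf : flag = false := by
                cases flag
                · rfl
                · have := hflag rfl; omega
              rw [hf]
              simp only [Bool.false_eq_true, if_false]
              rw [cpmWhile, dif_neg (by omega : ¬ L + 2 ≤ M)]
              rw [pyRange_two_eq_nil (by omega)]
              have : L = M - 1 := by omega
              simp [hm2, hMo, this]
            · rw [if_neg hL1]
              have hstep : L + 2 ≤ M := by omega
              rw [ih (L + 2) _ (by omega) (by omega) (by omega)]
              rw [pyRange_two_cons (by omega : L < M - 1)]
              simp only [List.map_cons, List.append_assoc, List.cons_append, List.nil_append,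
                List.singleton_append]
              have hd : (decide (s ≥ L) && decide (s < L + 2)) = decide (L ≤ s ∧ s < L + 2) := by
                simp [ge_iff_le, Bool.decide_and]
              rw [hd]
              congr 3
              rcases Int.emod_two_eq_zero_or_one M with hp | hp
              · have t1 : L ≤ M := hLM
                have t2 : L + 2 ≤ M := hstep
                cases flag <;> simp [hm2, hp, t1, t2]
              · have t1 : L ≤ M - 1 := by omega
                have t2 : L + 2 ≤ M - 1 := by omega
                simp [hm2, hp, t1, t2]
      · rw [dif_neg hLM]
        rw [pyRange_two_eq_nil (by omega)]
        have t1 : ¬ L ≤ M - 1 := by omega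
        rcases Int.emod_two_eq_zero_or_one M with hp | hp <;>
          simp [hm2, hp, t1, hLM]

lemma inner_items :
    ∀ (props : List Bool) (d : PySem.Dict Int Bool) (c : Int), (∀ key ∈ d.keys, key ≤ c) →
      (props.foldl (fun st p => (st.1.insert (st.2 + 1) p, st.2 + 1)) (d, c)).1.items
          = d.items ++ PySem.List.enumerate props (c + 1) ∧
      (props.foldl (fun st p => (st.1.insert (st.2 + 1) p, st.2 + 1)) (d, c)).2 = c + props.length ∧
      ∀ key ∈ (props.foldl (fun st p => (st.1.insert (st.2 + 1) p, st.2 + 1)) (d, c)).1.keys,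
        key ≤ (props.foldl (fun st p => (st.1.insert (st.2 + 1) p, st.2 + 1)) (d, c)).2 := by
  intro props
  induction props with
  | nil =>
      intro d c hb
      refine ⟨by simp [PySem.List.enumerate], by simp, by simpa using hb⟩
  | cons p t ih =>
      intro d c hb
      have hc : d.contains (c + 1) = false := by
        cases h : d.contains (c + 1)
        · rfl
        · have := (PySem.Dict.contains_iff_mem_keys d (c + 1)).mp h
          have := hb _ this
          omega
      have hb' : ∀ key ∈ (d.insert (c + 1) p).keys, key ≤ c + 1 := by
        intro key hk
        rw [PySem.Dict.keys_insert_of_not_contains d p hc] at hk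
        rcases List.mem_append.mp hk with h | h
        · have := hb _ h; omega
        · simp at h; omega
      obtain ⟨h1, h2, h3⟩ := ih (d.insert (c + 1) p) (c + 1) hb'
      simp only [List.foldl_cons]
      refine ⟨?_, ?_, h3⟩
      · rw [h1, PySem.Dict.items_insert_of_not_contains d p hc,
          PySem.List.enumerate_cons, List.append_assoc]
        simp
      · rw [h2]
        simp only [List.length_cons]
        push_cast
        ring

lemma outer_items :
    ∀ (lk : List Int) (seg : Int → List Bool) (d : PySem.Dict Int Bool) (c : Int),
      (∀ key ∈ d.keys, key ≤ c) →
      (lk.foldl (fun st k => (seg k).foldl (fun st p => (st.1.insert (st.2 + 1) p, st.2 + 1)) st) (d, c)).1.items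
          = d.items ++ PySem.List.enumerate (lk.flatMap seg) (c + 1) ∧
      ∀ key ∈ (lk.foldl (fun st k => (seg k).foldl (fun st p => (st.1.insert (st.2 + 1) p, st.2 + 1)) st) (d, c)).1.keys,
        key ≤ (lk.foldl (fun st k => (seg k).foldl (fun st p => (st.1.insert (st.2 + 1) p, st.2 + 1)) st) (d, c)).2 := by
  intro lk
  induction lk with
  | nil =>
      intro seg d c hb
      refine ⟨by simp [PySem.List.enumerate], by simpa using hb⟩
  | cons k t ih =>
      intro seg d c hb
      obtain ⟨h1, h2, h3⟩ := inner_items (seg k) d c hb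
      simp only [List.foldl_cons]
      rcases hst : (seg k).foldl (fun st p => (st.1.insert (st.2 + 1) p, st.2 + 1)) (d, c) with ⟨d₁, c₁⟩
      rw [hst] at h1 h2 h3
      rw [hst]
      obtain ⟨g1, g2⟩ := ih seg d₁ c₁ h3
      refine ⟨?_, g2⟩
      rw [g1, h1]
      simp only [List.flatMap_cons, PySem.List.enumerate_append, List.append_assoc]
      have : c₁ + 1 = c + 1 + ((seg k).length : Int) := by
        simp only at h2
        omega
      rw [this]

lemma update_items :
    ∀ (ps : List (Int × Bool)) (d : PySem.Dict Int Bool),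
      (∀ p ∈ ps, d.contains p.1 = false) → (ps.map Prod.fst).Nodup →
      (d.update ps).items = d.items ++ ps := by
  intro ps
  induction ps with
  | nil => intro d _ _; simp [PySem.Dict.update]
  | cons p t ih =>
      intro d h hnd
      have hp := h p (List.mem_cons_self ..)
      simp only [PySem.Dict.update, List.foldl_cons]
      have h' : ∀ q ∈ t, (d.insert p.1 p.2).contains q.1 = false := by
        intro q hq
        rw [PySem.Dict.contains_insert]
        have hq1 : d.contains q.1 = false := h q (List.mem_cons_of_mem _ hq)
        have hq2 : q.1 ≠ p.1 := by
          intro he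
          have : p.1 ∈ t.map Prod.fst := by
            exact List.mem_map.mpr ⟨q, hq, he⟩
          exact (List.nodup_cons.mp (by simpa using hnd)).1 this
        simp [hq1, hq2]
      have := ih (d.insert p.1 p.2) h' (by simpa using (List.nodup_cons.mp (by simpa using hnd)).2)
      simp only [PySem.Dict.update] at this
      rw [this, PySem.Dict.items_insert_of_not_contains d p.2 hp]
      simp

lemma ofList_items (ps : List (Int × Bool)) (hnd : (ps.map Prod.fst).Nodup) :
    (PySem.Dict.ofList ps).items = ps := by
  rw [PySem.Dict.ofList, update_items ps PySem.Dict.empty (fun p _ => PySem.Dict.contains_empty p.1) hnd]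
  rfl

-- S_k as the literal list-sum over i of range(32) (shared reference value of both sides)
def sVal (a b k : Int) : Int :=
  ((PySem.List.pyRange 0 32 1).map
    (fun i => if 0 ≤ k - i ∧ k - i < 32 then pyBit a i * pyBit b (k - i) else 0)).sum

lemma comb_getD (a b x y : Int) (hx0 : 0 ≤ x) (hx1 : x < 32) (hy0 : 0 ≤ y) (hy1 : y < 32) :
    PySem.Dict.getD
      ((PySem.List.pyRange 0 32 1).foldl (fun d i =>
        (PySem.List.pyRange 0 32 1).foldl (fun d j =>
          d.insert (i, j)
            (PySem.List.pyGetD ((PySem.List.pyRange 0 32 1).map (fun i => pyBit a i)) i 0 *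
             PySem.List.pyGetD ((PySem.List.pyRange 0 32 1).map (fun i => pyBit b i)) j 0)) d)
        PySem.Dict.empty) (x, y) 0
      = pyBit a x * pyBit b y := by
  have h1 : ((PySem.List.pyRange 0 32 1).foldl (fun d i =>
        (PySem.List.pyRange 0 32 1).foldl (fun d j =>
          d.insert (i, j)
            (PySem.List.pyGetD ((PySem.List.pyRange 0 32 1).map (fun i => pyBit a i)) i 0 *
             PySem.List.pyGetD ((PySem.List.pyRange 0 32 1).map (fun i => pyBit b i)) j 0)) d)
        PySem.Dict.empty)
      = ((PySem.List.pyRange 0 32 1).foldl (fun d i =>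
        (PySem.List.pyRange 0 32 1).foldl (fun d j =>
          d.insert (i, j) (pyBit a i * pyBit b j)) d) PySem.Dict.empty) := by
    apply PySem.List.foldl_congr_mem
    intro d i hi
    apply PySem.List.foldl_congr_mem
    intro d' j hj
    have hib := PySem.List.mem_pyRange_one.mp hi
    have hjb := PySem.List.mem_pyRange_one.mp hj
    rw [PySem.List.pyGetD_map_pyRange_of_nonneg _ 32 i 0 hib.1 hib.2,
        PySem.List.pyGetD_map_pyRange_of_nonneg _ 32 j 0 hjb.1 hjb.2]
  rw [h1]
  unfold PySem.Dict.getD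
  rw [comb_get (fun i j => pyBit a i * pyBit b j) _ _ x y
    (PySem.List.mem_pyRange_one.mpr ⟨hx0, hx1⟩) (PySem.List.mem_pyRange_one.mpr ⟨hy0, hy1⟩)
    PySem.Dict.empty]
  rfl

lemma sumA (a b k : Int) (d : PySem.Dict (Int × Int) Int)
    (hd : ∀ x y : Int, 0 ≤ x → x < 32 → 0 ≤ y → y < 32 →
      PySem.Dict.getD d (x, y) 0 = pyBit a x * pyBit b y)
    (hk : 1 ≤ k) (hk' : k < 62) :
    (PySem.List.pyRange (max 0 (k - 31)) (min k 31 + 1) 1).foldl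
      (fun s i => if 0 ≤ k - i ∧ k - i < 32 then s + PySem.Dict.getD d (i, k - i) 0 else s) 0
      = sVal a b k := by
  have hcongr : (PySem.List.pyRange (max 0 (k - 31)) (min k 31 + 1) 1).foldl
      (fun s i => if 0 ≤ k - i ∧ k - i < 32 then s + PySem.Dict.getD d (i, k - i) 0 else s) 0
      = (PySem.List.pyRange (max 0 (k - 31)) (min k 31 + 1) 1).foldl
      (fun s i => s + (if 0 ≤ k - i ∧ k - i < 32 then pyBit a i * pyBit b (k - i) else 0)) 0 := by
    apply PySem.List.foldl_congr_mem
    intro acc i hi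
    have hib := PySem.List.mem_pyRange_one.mp hi
    by_cases hc : 0 ≤ k - i ∧ k - i < 32
    · rw [if_pos hc, if_pos hc, hd i (k - i) (by omega) (by omega) (by omega) (by omega)]
    · rw [if_neg hc, if_neg hc]; ring
  rw [hcongr, PySem.List.foldl_add]
  have hsplit1 : PySem.List.pyRange 0 32 1
      = PySem.List.pyRange 0 (max 0 (k - 31)) 1 ++ PySem.List.pyRange (max 0 (k - 31)) 32 1 :=
    PySem.List.pyRange_one_append _ _ _ (by omega) (by omega)
  have hsplit2 : PySem.List.pyRange (max 0 (k - 31)) 32 1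
      = PySem.List.pyRange (max 0 (k - 31)) (min k 31 + 1) 1 ++ PySem.List.pyRange (min k 31 + 1) 32 1 :=
    PySem.List.pyRange_one_append _ _ _ (by omega) (by omega)
  unfold sVal
  rw [hsplit1, hsplit2]
  simp only [List.map_append, List.sum_append]
  have hz1 : ((PySem.List.pyRange 0 (max 0 (k - 31)) 1).map
      (fun i => if 0 ≤ k - i ∧ k - i < 32 then pyBit a i * pyBit b (k - i) else 0)).sum = 0 := by
    apply List.sum_eq_zero
    intro x hx
    rcases List.mem_map.mp hx with ⟨i, hi, rfl⟩
    have hib := PySem.List.mem_pyRange_one.mp hi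
    rw [if_neg (by omega)]
  have hz2 : ((PySem.List.pyRange (min k 31 + 1) 32 1).map
      (fun i => if 0 ≤ k - i ∧ k - i < 32 then pyBit a i * pyBit b (k - i) else 0)).sum = 0 := by
    apply List.sum_eq_zero
    intro x hx
    rcases List.mem_map.mp hx with ⟨i, hi, rfl⟩
    have hib := PySem.List.mem_pyRange_one.mp hi
    rw [if_neg (by omega)]
  rw [hz1, hz2]
  ring

lemma segAB (s k : Int) (hk : 1 ≤ k) (hk' : k < 62) :
    (if (if k < 32 then k + 1 else 63 - k) = 2 then [decide (s = 2)]
     else if (if k < 32 then k + 1 else 63 - k) = 3 then [decide (s ≥ 2)]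
     else cpmWhile s (if k < 32 then k + 1 else 63 - k) (decide (k = 31)) 2 [] ++ [decide (s ≥ 2)])
    = (if (if k < 32 then k + 1 else 63 - k) = 2 then [decide (s = 2)]
       else if (if k < 32 then k + 1 else 63 - k) = 3 then [decide (s ≥ 2)]
       else (PySem.List.pyRange 2 ((if k < 32 then k + 1 else 63 - k) - 1) 2).map
              (fun L => decide (L ≤ s ∧ s < L + 2))
          ++ (if PySem.Int.mod (if k < 32 then k + 1 else 63 - k) 2 = 1
              then [decide (s ≥ (if k < 32 then k + 1 else 63 - k) - 1)]
              else if k ≠ 31 then [decide (s = (if k < 32 then k + 1 else 63 - k))] else [])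
          ++ [decide (s ≥ 2)]) := by
  set M : Int := if k < 32 then k + 1 else 63 - k with hM
  have hMb : 2 ≤ M ∧ M ≤ 32 := by
    rw [hM]; split_ifs <;> omega
  by_cases h2 : M = 2
  · rw [if_pos h2, if_pos h2]
  · rw [if_neg h2, if_neg h2]
    by_cases h3 : M = 3
    · rw [if_pos h3, if_pos h3]
    · rw [if_neg h3, if_neg h3]
      have h4 : 4 ≤ M := by omega
      have hflag : decide (k = 31) = true → M = 32 := by
        intro h
        have : k = 31 := of_decide_eq_true h
        rw [hM]; omega
      rw [cpmWhile_eq s M (decide (k = 31)) hflag (M + 1 - 2).toNat 2 [] (by omega) (by omega) (by omega)]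
      simp only [List.nil_append, List.append_assoc]
      congr 2
      have hm2 : PySem.Int.mod M 2 = M % 2 := PySem.Int.mod_eq_emod_of_pos (by norm_num)
      rcases Int.emod_two_eq_zero_or_one M with hp | hp
      · by_cases h31 : k = 31
        · simp [hm2, hp, h31]
        · have : decide (k = 31) = false := decide_eq_false h31
          simp [hm2, hp, this, h31, h4]
          omega
      · simp [hm2, hp, show (2:Int) ≤ M - 1 by omega]

def combT (a b : Int) : PySem.Dict (Int × Int) Int :=
  (PySem.List.pyRange 0 32 1).foldl (fun d i =>
    (PySem.List.pyRange 0 32 1).foldl (fun d j =>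
      d.insert (i, j)
        (PySem.List.pyGetD ((PySem.List.pyRange 0 32 1).map (fun i => pyBit a i)) i 0 *
         PySem.List.pyGetD ((PySem.List.pyRange 0 32 1).map (fun i => pyBit b i)) j 0)) d)
    PySem.Dict.empty

def sumT (a b k : Int) : Int :=
  (PySem.List.pyRange (max 0 (k - 31)) (min k 31 + 1) 1).foldl
    (fun s i => if 0 ≤ k - i ∧ k - i < 32 then s + PySem.Dict.getD (combT a b) (i, k - i) 0 else s) 0

-- B's spread value (sum of bits placed in 7-bit slots)
def spreadT (x : Int) : Int :=
  (PySem.List.pyRange 0 32 1).foldl (fun acc i => acc + pyBit x i * 128 ^ i.toNat) 0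

def segB (a b k : Int) : List Bool :=
  if (if k < 32 then k + 1 else 63 - k) = 2 then [decide (sVal a b k = 2)]
  else if (if k < 32 then k + 1 else 63 - k) = 3 then [decide (sVal a b k ≥ 2)]
  else (PySem.List.pyRange 2 ((if k < 32 then k + 1 else 63 - k) - 1) 2).map
         (fun L => decide (L ≤ sVal a b k ∧ sVal a b k < L + 2))
     ++ (if PySem.Int.mod (if k < 32 then k + 1 else 63 - k) 2 = 1
         then [decide (sVal a b k ≥ (if k < 32 then k + 1 else 63 - k) - 1)]
         else if k ≠ 31 then [decide (sVal a b k = (if k < 32 then k + 1 else 63 - k))] else [])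
     ++ [decide (sVal a b k ≥ 2)]

lemma sumT_eq (a b k : Int) (hk : 1 ≤ k) (hk' : k < 62) : sumT a b k = sVal a b k := by
  unfold sumT
  exact sumA a b k (combT a b)
    (fun x y hx0 hx1 hy0 hy1 => by unfold combT; exact comb_getD a b x y hx0 hx1 hy0 hy1)
    hk hk'

-- ===== B-side: Kronecker substitution lemmas =====

lemma list_sum_range (f : ℕ → Int) (n : ℕ) :
    ((List.range n).map f).sum = ∑ i ∈ Finset.range n, f i := by
  induction n with
  | zero => simp
  | succ n ih => rw [List.range_succ, Finset.sum_range_succ, List.map_append]; simp [ih]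

lemma spreadT_eq (x : Int) : spreadT x = ∑ i ∈ Finset.range 32, pyBit x (i : Int) * 128 ^ i := by
  unfold spreadT
  rw [PySem.List.foldl_add, PySem.List.pyRange_one, List.map_map]
  have hfun : (List.range ((32:Int) - 0).toNat).map
      ((fun i : Int => pyBit x i * 128 ^ i.toNat) ∘ fun k : ℕ => (0 : Int) + ↑k)
      = (List.range 32).map (fun k : ℕ => pyBit x (k : Int) * 128 ^ k) := by
    apply List.map_congr_left
    intro k _
    simp [Function.comp]
  rw [hfun, zero_add, list_sum_range]

-- the k-th base-128 digit of the product, as a Finset convolution sum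
def dcoef (a b : Int) (k : ℕ) : Int :=
  ∑ i ∈ Finset.range 32, if i ≤ k ∧ k - i < 32 then pyBit a (i : Int) * pyBit b ((k - i : ℕ) : Int) else 0

lemma conv_eq (a b : Int) :
    spreadT a * spreadT b = ∑ k ∈ Finset.range 63, dcoef a b k * 128 ^ k := by
  rw [spreadT_eq, spreadT_eq, Finset.sum_mul_sum]
  unfold dcoef
  rw [eq_comm]
  calc ∑ k ∈ Finset.range 63,
        (∑ i ∈ Finset.range 32, if i ≤ k ∧ k - i < 32 then pyBit a (i : Int) * pyBit b ((k - i : ℕ) : Int) else 0) * 128 ^ k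
      = ∑ k ∈ Finset.range 63, ∑ i ∈ Finset.range 32,
          (if i ≤ k ∧ k - i < 32 then pyBit a (i : Int) * pyBit b ((k - i : ℕ) : Int) else 0) * 128 ^ k := by
        refine Finset.sum_congr rfl fun k _ => ?_
        rw [Finset.sum_mul]
    _ = ∑ i ∈ Finset.range 32, ∑ k ∈ Finset.range 63,
          (if i ≤ k ∧ k - i < 32 then pyBit a (i : Int) * pyBit b ((k - i : ℕ) : Int) else 0) * 128 ^ k :=
        Finset.sum_comm
    _ = ∑ i ∈ Finset.range 32, ∑ j ∈ Finset.range 32,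
          pyBit a (i : Int) * 128 ^ i * (pyBit b (j : Int) * 128 ^ j) := by
        refine Finset.sum_congr rfl fun i hi => ?_
        have hi32 : i < 32 := Finset.mem_range.mp hi
        have himg : (Finset.range 32).image (fun j => i + j) ⊆ Finset.range 63 := by
          intro k hk
          rcases Finset.mem_image.mp hk with ⟨j, hj, rfl⟩
          have := Finset.mem_range.mp hj
          exact Finset.mem_range.mpr (by omega)
        have hz : ∀ k ∈ Finset.range 63, k ∉ (Finset.range 32).image (fun j => i + j) →
            (if i ≤ k ∧ k - i < 32 then pyBit a (i : Int) * pyBit b ((k - i : ℕ) : Int) else 0) * 128 ^ k = 0 := by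
          intro k _ hk
          rw [if_neg, zero_mul]
          intro hc
          exact hk (Finset.mem_image.mpr ⟨k - i, Finset.mem_range.mpr hc.2, by omega⟩)
        rw [← Finset.sum_subset himg hz,
          Finset.sum_image (fun x _ y _ h => by omega)]
        refine Finset.sum_congr rfl fun j hj => ?_
        have hj32 : j < 32 := Finset.mem_range.mp hj
        rw [if_pos ⟨by omega, by omega⟩]
        rw [show i + j - i = j from by omega]
        rw [pow_add]
        ring

lemma dcoef_bounds (a b : Int) (k : ℕ) : 0 ≤ dcoef a b k ∧ dcoef a b k < 128 := by
  unfold dcoef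
  constructor
  · apply Finset.sum_nonneg
    intro i _
    split_ifs with h
    · rcases bit01 a (i : Int) with h1 | h1 <;> rcases bit01 b ((k - i : ℕ) : Int) with h2 | h2 <;>
        simp [h1, h2]
    · exact le_refl 0
  · calc (∑ i ∈ Finset.range 32,
          if i ≤ k ∧ k - i < 32 then pyBit a (i : Int) * pyBit b ((k - i : ℕ) : Int) else 0)
        ≤ ∑ _i ∈ Finset.range 32, (1 : Int) := by
          apply Finset.sum_le_sum
          intro i _
          split_ifs with h
          · rcases bit01 a (i : Int) with h1 | h1 <;> rcases bit01 b ((k - i : ℕ) : Int) with h2 | h2 <;>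
              simp [h1, h2]
          · norm_num
      _ < 128 := by simp

lemma lo_bound (a b : Int) (k : ℕ) :
    0 ≤ ∑ m ∈ Finset.range k, dcoef a b m * 128 ^ m ∧
    ∑ m ∈ Finset.range k, dcoef a b m * 128 ^ m < 128 ^ k := by
  induction k with
  | zero => simp
  | succ k ih =>
      rw [Finset.sum_range_succ]
      have hb := dcoef_bounds a b k
      have hp : (0 : Int) < 128 ^ k := by positivity
      have h1 : dcoef a b k * 128 ^ k ≤ 127 * 128 ^ k :=
        mul_le_mul_of_nonneg_right (by omega) (le_of_lt hp)
      have h2 : 0 ≤ dcoef a b k * 128 ^ k := mul_nonneg hb.1 (le_of_lt hp)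
      have h3 : (128 : Int) ^ (k + 1) = 128 * 128 ^ k := by rw [pow_succ]; ring
      constructor
      · omega
      · omega

lemma digit_extract (a b : Int) (k : ℕ) (hk : k < 63) :
    PySem.Int.mod (PySem.Int.floordiv (spreadT a * spreadT b) (128 ^ k)) 128 = dcoef a b k := by
  rw [conv_eq]
  have h63 : 63 - k = (62 - k) + 1 := by omega
  have hsplit : ∑ m ∈ Finset.range 63, dcoef a b m * 128 ^ m
      = (∑ m ∈ Finset.range k, dcoef a b m * 128 ^ m)
        + (dcoef a b k
           + 128 * ∑ m ∈ Finset.range (62 - k), dcoef a b (k + 1 + m) * 128 ^ m) * 128 ^ k := by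
    rw [Finset.range_eq_Ico, ← Finset.sum_Ico_consecutive _ (Nat.zero_le k) (by omega : k ≤ 63),
        ← Finset.range_eq_Ico, Finset.sum_Ico_eq_sum_range, h63, Finset.sum_range_succ']
    have hterm : ∀ m : ℕ, dcoef a b (k + (m + 1)) * 128 ^ (k + (m + 1))
        = (128 * (dcoef a b (k + 1 + m) * 128 ^ m)) * 128 ^ k := by
      intro m
      have he : k + (m + 1) = k + 1 + m := by omega
      rw [he, pow_add, pow_add, pow_one]
      ring
    rw [Finset.sum_congr rfl (fun m _ => hterm m), ← Finset.sum_mul, ← Finset.mul_sum]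
    simp only [Nat.add_zero]
    ring
  rw [hsplit]
  have hlo := lo_bound a b k
  have hhi : 0 ≤ ∑ m ∈ Finset.range (62 - k), dcoef a b (k + 1 + m) * 128 ^ m := by
    apply Finset.sum_nonneg
    intro m _
    exact mul_nonneg (dcoef_bounds a b _).1 (by positivity)
  have hpk : (0 : Int) < 128 ^ k := by positivity
  rw [PySem.Int.floordiv_eq_ediv_of_pos hpk]
  rw [Int.add_mul_ediv_right _ _ (ne_of_gt hpk)]
  rw [Int.ediv_eq_zero_of_lt hlo.1 hlo.2, zero_add]
  rw [PySem.Int.mod_eq_emod_of_pos (by norm_num)]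
  have hb := dcoef_bounds a b k
  rw [Int.add_mul_emod_self_left]
  exact Int.emod_eq_of_lt hb.1 hb.2

lemma sVal_eq_dcoef (a b : Int) (k : ℕ) : sVal a b (k : Int) = dcoef a b k := by
  unfold sVal dcoef
  rw [PySem.List.pyRange_one]
  rw [show ((32 : Int) - 0).toNat = 32 from rfl]
  rw [List.map_map, list_sum_range]
  refine Finset.sum_congr rfl fun i _ => ?_
  simp only [Function.comp_apply, zero_add]
  by_cases h : i ≤ k ∧ k - i < 32
  · rw [if_pos (by omega), if_pos h]
    have he : ((k : Int) - (i : Int)) = (((k - i : ℕ) : Int)) := by omega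
    rw [he]
  · rw [if_neg (by omega), if_neg h]

lemma digitT_eq (a b k : Int) (hk : 1 ≤ k) (hk' : k < 62) :
    PySem.Int.mod (PySem.Int.floordiv (spreadT a * spreadT b) (128 ^ k.toNat)) 128 = sVal a b k := by
  rw [digit_extract a b k.toNat (by omega)]
  rw [← sVal_eq_dcoef]
  congr 1
  omega

-- ===== glue to the ports =====

lemma bodyA_eq (a b : Int) : ∀ (st : PySem.Dict Int Bool × Int), ∀ k ∈ PySem.List.pyRange 1 62 1,
    ((if (if k < 32 then k + 1 else 63 - k) = 2 then [decide (sumT a b k = 2)]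
      else if (if k < 32 then k + 1 else 63 - k) = 3 then [decide (sumT a b k ≥ 2)]
      else cpmWhile (sumT a b k) (if k < 32 then k + 1 else 63 - k) (decide (k = 31)) 2 []
           ++ [decide (sumT a b k ≥ 2)]).foldl
        (fun st p => (st.1.insert (st.2 + 1) p, st.2 + 1)) st)
    = (segB a b k).foldl (fun st p => (st.1.insert (st.2 + 1) p, st.2 + 1)) st := by
  intro st k hk
  have hkb := PySem.List.mem_pyRange_one.mp hk
  rw [sumT_eq a b k hkb.1 hkb.2]
  rw [segAB (sVal a b k) k hkb.1 hkb.2]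
  rfl

lemma A_items (a b : Int) :
    count_pattern_matches a b
      = PySem.List.enumerate ((PySem.List.pyRange 1 62 1).flatMap (segB a b)) 1 := by
  have h0 : count_pattern_matches a b
      = ((PySem.List.pyRange 1 62 1).foldl (fun st k =>
          ((if (if k < 32 then k + 1 else 63 - k) = 2 then [decide (sumT a b k = 2)]
            else if (if k < 32 then k + 1 else 63 - k) = 3 then [decide (sumT a b k ≥ 2)]
            else cpmWhile (sumT a b k) (if k < 32 then k + 1 else 63 - k) (decide (k = 31)) 2 []
                 ++ [decide (sumT a b k ≥ 2)]).foldl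
            (fun st p => (st.1.insert (st.2 + 1) p, st.2 + 1)) st))
          (PySem.Dict.empty, 0)).1.items := rfl
  rw [h0]
  rw [PySem.List.foldl_congr_mem _ _
    (fun st k => (segB a b k).foldl (fun st p => (st.1.insert (st.2 + 1) p, st.2 + 1)) st) _
    (bodyA_eq a b)]
  have hempty : ∀ key ∈ (PySem.Dict.empty : PySem.Dict Int Bool).keys, key ≤ (0 : Int) := by
    intro key hk
    simp [PySem.Dict.empty, PySem.Dict.keys] at hk
  rw [(outer_items (PySem.List.pyRange 1 62 1) (segB a b) PySem.Dict.empty 0 hempty).1]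
  norm_num
  rfl

lemma bodyB_eq (a b : Int) : ∀ (acc : List Bool), ∀ k ∈ PySem.List.pyRange 1 62 1,
    (if (if k < 32 then k + 1 else 63 - k) = 2
     then acc ++ [decide (PySem.Int.mod (PySem.Int.floordiv (spreadT a * spreadT b) (128 ^ k.toNat)) 128 = 2)]
     else if (if k < 32 then k + 1 else 63 - k) = 3
     then acc ++ [decide (PySem.Int.mod (PySem.Int.floordiv (spreadT a * spreadT b) (128 ^ k.toNat)) 128 ≥ 2)]
     else acc ++ ((PySem.List.pyRange 2 ((if k < 32 then k + 1 else 63 - k) - 1) 2).map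
            (fun L => decide (L ≤ PySem.Int.mod (PySem.Int.floordiv (spreadT a * spreadT b) (128 ^ k.toNat)) 128 ∧
                              PySem.Int.mod (PySem.Int.floordiv (spreadT a * spreadT b) (128 ^ k.toNat)) 128 < L + 2))
        ++ (if PySem.Int.mod (if k < 32 then k + 1 else 63 - k) 2 = 1
            then [decide (PySem.Int.mod (PySem.Int.floordiv (spreadT a * spreadT b) (128 ^ k.toNat)) 128 ≥ (if k < 32 then k + 1 else 63 - k) - 1)]
            else if k ≠ 31
            then [decide (PySem.Int.mod (PySem.Int.floordiv (spreadT a * spreadT b) (128 ^ k.toNat)) 128 = (if k < 32 then k + 1 else 63 - k))]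
            else [])
        ++ [decide (PySem.Int.mod (PySem.Int.floordiv (spreadT a * spreadT b) (128 ^ k.toNat)) 128 ≥ 2)]))
    = acc ++ segB a b k := by
  intro acc k hk
  have hkb := PySem.List.mem_pyRange_one.mp hk
  rw [digitT_eq a b k (by omega) (by omega)]
  unfold segB
  split_ifs <;> rfl

lemma B_items (a b : Int) :
    count_pattern_matches_alt a b
      = PySem.List.enumerate ((PySem.List.pyRange 1 62 1).flatMap (segB a b)) 1 := by
  have h0 : count_pattern_matches_alt a b
      = (PySem.Dict.ofList (PySem.List.enumerate
          ((PySem.List.pyRange 1 62 1).foldl (fun acc k =>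
            if (if k < 32 then k + 1 else 63 - k) = 2
            then acc ++ [decide (PySem.Int.mod (PySem.Int.floordiv (spreadT a * spreadT b) (128 ^ k.toNat)) 128 = 2)]
            else if (if k < 32 then k + 1 else 63 - k) = 3
            then acc ++ [decide (PySem.Int.mod (PySem.Int.floordiv (spreadT a * spreadT b) (128 ^ k.toNat)) 128 ≥ 2)]
            else acc ++ ((PySem.List.pyRange 2 ((if k < 32 then k + 1 else 63 - k) - 1) 2).map
                   (fun L => decide (L ≤ PySem.Int.mod (PySem.Int.floordiv (spreadT a * spreadT b) (128 ^ k.toNat)) 128 ∧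
                                     PySem.Int.mod (PySem.Int.floordiv (spreadT a * spreadT b) (128 ^ k.toNat)) 128 < L + 2))
               ++ (if PySem.Int.mod (if k < 32 then k + 1 else 63 - k) 2 = 1
                   then [decide (PySem.Int.mod (PySem.Int.floordiv (spreadT a * spreadT b) (128 ^ k.toNat)) 128 ≥ (if k < 32 then k + 1 else 63 - k) - 1)]
                   else if k ≠ 31
                   then [decide (PySem.Int.mod (PySem.Int.floordiv (spreadT a * spreadT b) (128 ^ k.toNat)) 128 = (if k < 32 then k + 1 else 63 - k))]
                   else [])
               ++ [decide (PySem.Int.mod (PySem.Int.floordiv (spreadT a * spreadT b) (128 ^ k.toNat)) 128 ≥ 2)])) []) 1)).items := rfl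
  rw [h0]
  rw [PySem.List.foldl_congr_mem _ _ (fun acc k => acc ++ segB a b k) _ (bodyB_eq a b)]
  rw [PySem.List.foldl_append_eq_flatMap, List.nil_append]
  apply ofList_items
  show ((PySem.List.enumerate ((PySem.List.pyRange 1 62 1).flatMap (segB a b)) 1).map
    (fun x => x.1)).Nodup
  rw [PySem.List.map_fst_enumerate]
  exact PySem.List.nodup_pyRange_one _ _

-- ===== VERDICT (by name: the statement is the Claim_ definition above) =====
theorem count_pattern_matches_spec : Claim_equal_count_pattern_matches := by
  intro a b _
  unfold Spec_count_pattern_matches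
  rw [A_items, B_items]
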